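-- pv_equiv track=rewrite | github.com/sumitmalik51/tool-plagrism | app/tools/fingerprint_tool.py | _is_common_phrase
-- ===== SOURCE A (Python) =====
-- _COMMON_ACADEMIC_PHRASES: set[tuple[str, ...]] = {
--     tuple(p.split()) for p in [
--         "in this paper we",
--         "in this study we",
--         "the results show that",
--         "the results indicate that",
--         "it has been shown that",
--         "it is well known that",
--         "on the other hand",
--         "in order to",
--         "as well as",
--         "with respect to",
--         "in the case of",
--         "it should be noted that",
--         "as shown in figure",
--         "as shown in table",
--         "et al",
--         "for example",
--         "such as",
--         "due to the",
--         "according to the",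
--         "based on the",
--         "in terms of",
--         "as a result",
--         "in addition to",
--         "it can be seen that",
--         "we propose a",
--         "we present a",
--         "in the literature",
--         "has been widely used",
--         "state of the art",
--         "to the best of our knowledge",
--     ]
-- }
--
-- def _is_common_phrase(ngram: tuple[str, ...]) -> bool:
--     """Return True if the n-gram is a common academic phrase."""
--     for common in _COMMON_ACADEMIC_PHRASES:
--         clen = len(common)
--         nlen = len(ngram)
--         if nlen >= clen:
--             # Check if common phrase is a contiguous sub-sequence
--             for start in range(nlen - clen + 1):
--                 if ngram[start : start + clen] == common:
--                     return True
--         elif clen >= nlen: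
--             for start in range(clen - nlen + 1):
--                 if common[start : start + nlen] == ngram:
--                     return True
--     return False
-- ===== SOURCE B (Python) =====
-- _COMMON_ACADEMIC_PHRASES: set[tuple[str, ...]] = {
--     tuple(p.split()) for p in [
--         "in this paper we",
--         "in this study we",
--         "the results show that",
--         "the results indicate that",
--         "it has been shown that",
--         "it is well known that",
--         "on the other hand",
--         "in order to",
--         "as well as",
--         "with respect to",
--         "in the case of",
--         "it should be noted that",
--         "as shown in figure",
--         "as shown in table",
--         "et al",
--         "for example",
--         "such as",
--         "due to the",
--         "according to the",
--         "based on the",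
--         "in terms of",
--         "as a result",
--         "in addition to",
--         "it can be seen that",
--         "we propose a",
--         "we present a",
--         "in the literature",
--         "has been widely used",
--         "state of the art",
--         "to the best of our knowledge",
--     ]
-- }
--
-- # Precomputed once at import: the full phrases, every contiguous sub-tuple
-- # (all lengths, including the empty tuple) of every phrase, and the distinct
-- # phrase lengths.
-- _FULL = frozenset(_COMMON_ACADEMIC_PHRASES)
-- _SUB = frozenset(
--     p[i:i + k]
--     for p in _COMMON_ACADEMIC_PHRASES
--     for i in range(len(p) + 1)
--     for k in range(len(p) + 1 - i)
-- )
-- _LENGTHS = frozenset(len(p) for p in _COMMON_ACADEMIC_PHRASES)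
--
--
-- def _is_common_phrase(ngram: tuple[str, ...]) -> bool:
--     """Return True if the n-gram is a common academic phrase."""
--     if ngram in _SUB:
--         return True
--     for i in range(len(ngram)):
--         for length in _LENGTHS:
--             if ngram[i:i + length] in _FULL:
--                 return True
--     return False
-- ===== Notes on version B (the rewrite author's own statement) =====
-- stated objective: faster
-- what changed: Replaces A's per-phrase double scan (for each of the 30 phrases, slide the shorter tuple over the longer) with sets precomputed at import time: a set of all contiguous sub-tuples of the phrases answers 'ngram inside a phrase' with one lookup, and a suffix-walking while loop over the ngram, trying only the distinct phrase lengths as prefixes against the full-phrase set, answers 'phrase inside ngram'.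
import Mathlib
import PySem

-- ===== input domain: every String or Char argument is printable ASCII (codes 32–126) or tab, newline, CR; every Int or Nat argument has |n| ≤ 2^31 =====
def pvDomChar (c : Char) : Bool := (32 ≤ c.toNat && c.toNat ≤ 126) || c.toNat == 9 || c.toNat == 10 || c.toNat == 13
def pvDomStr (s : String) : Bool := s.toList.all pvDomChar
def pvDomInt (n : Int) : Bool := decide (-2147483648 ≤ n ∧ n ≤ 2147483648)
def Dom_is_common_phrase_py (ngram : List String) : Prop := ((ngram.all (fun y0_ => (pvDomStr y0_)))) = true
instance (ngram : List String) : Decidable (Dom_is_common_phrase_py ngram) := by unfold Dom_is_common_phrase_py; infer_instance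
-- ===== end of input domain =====

-- B replaces A's per-phrase double scan by sets precomputed at import time
-- (all phrase sub-tuples, the full phrases, the distinct phrase lengths):
-- one sub-tuple lookup plus one suffix-walking loop over the ngram.

-- ===== PORT A =====
-- module constant _COMMON_ACADEMIC_PHRASES: the split phrases (all distinct)
def pvPhrases : List (List String) := [
  ["in", "this", "paper", "we"],
  ["in", "this", "study", "we"],
  ["the", "results", "show", "that"],
  ["the", "results", "indicate", "that"],
  ["it", "has", "been", "shown", "that"],
  ["it", "is", "well", "known", "that"],
  ["on", "the", "other", "hand"],
  ["in", "order", "to"],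
  ["as", "well", "as"],
  ["with", "respect", "to"],
  ["in", "the", "case", "of"],
  ["it", "should", "be", "noted", "that"],
  ["as", "shown", "in", "figure"],
  ["as", "shown", "in", "table"],
  ["et", "al"],
  ["for", "example"],
  ["such", "as"],
  ["due", "to", "the"],
  ["according", "to", "the"],
  ["based", "on", "the"],
  ["in", "terms", "of"],
  ["as", "a", "result"],
  ["in", "addition", "to"],
  ["it", "can", "be", "seen", "that"],
  ["we", "propose", "a"],
  ["we", "present", "a"],
  ["in", "the", "literature"],
  ["has", "been", "widely", "used"],
  ["state", "of", "the", "art"],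
  ["to", "the", "best", "of", "our", "knowledge"]]

def pvCommonSet : PySem.Set (List String) := PySem.Set.ofList pvPhrases

-- Python iterates the set with an early `return True`: the boolean result is
-- order-independent, ported as `any` over the set's elements.
def is_common_phrase_py (ngram : List String) : Bool :=
  pvCommonSet.any (fun common =>
    let clen : Int := common.length
    let nlen : Int := ngram.length
    if nlen ≥ clen then
      (PySem.List.pyRange 0 (nlen - clen + 1) 1).any (fun start =>
        PySem.List.slice ngram (some start) (some (start + clen)) == common)
    else if clen ≥ nlen then
      (PySem.List.pyRange 0 (clen - nlen + 1) 1).any (fun start =>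
        PySem.List.slice common (some start) (some (start + nlen)) == ngram)
    else false)

-- ===== PORT B =====
-- B's module data: the phrase texts themselves, split at load time as in the Python
def pvTextsB : List String := [
  "in this paper we",
  "in this study we",
  "the results show that",
  "the results indicate that",
  "it has been shown that",
  "it is well known that",
  "on the other hand",
  "in order to",
  "as well as",
  "with respect to",
  "in the case of",
  "it should be noted that",
  "as shown in figure",
  "as shown in table",
  "et al",
  "for example",
  "such as",
  "due to the",
  "according to the",
  "based on the",
  "in terms of",
  "as a result",
  "in addition to",
  "it can be seen that",
  "we propose a",
  "we present a",
  "in the literature",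
  "has been widely used",
  "state of the art",
  "to the best of our knowledge"]

def pvPhrasesB : List (List String) := pvTextsB.map PySem.Str.split₀

def pvFullB : PySem.Set (List String) := PySem.Set.ofList pvPhrasesB

-- _SUB: every contiguous sub-tuple p[i:i+k] of every phrase; the Python slice
-- p[i:i+k] with 0 ≤ i, 0 ≤ k, i + k ≤ len(p) is exactly (p.drop i).take k
def pvSubB : PySem.Set (List String) :=
  PySem.Set.ofList (pvPhrasesB.flatMap (fun p =>
    (List.range (p.length + 1)).flatMap (fun i =>
      (List.range (p.length + 1 - i)).map (fun k => (p.drop i).take k))))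

-- _LENGTHS: the distinct phrase lengths
def pvLensB : PySem.Set Int := PySem.Set.ofList (pvPhrasesB.map (fun p => (p.length : Int)))

def is_common_phrase_py_alt (ngram : List String) : Bool :=
  if PySem.Set.contains pvSubB ngram then true
  else
    (PySem.List.pyRange 0 (ngram.length : Int) 1).any (fun i =>
      pvLensB.any (fun len =>
        PySem.Set.contains pvFullB (PySem.List.slice ngram (some i) (some (i + len)))))

-- ===== PRECONDITION & SPEC =====
def Spec_is_common_phrase_py (ngram : List String) (out : Bool) : Prop := out = is_common_phrase_py_alt ngram
instance (ngram : List String) (out : Bool) : Decidable (Spec_is_common_phrase_py ngram out) := by unfold Spec_is_common_phrase_py; infer_instance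

-- ===== CLAIM (what is proved, stated in full; the proofs are below) =====
def Claim_equal_is_common_phrase_py : Prop := ∀ (ngram : List String), Dom_is_common_phrase_py ngram → Spec_is_common_phrase_py ngram (is_common_phrase_py ngram)

-- ===== LEMMAS AND PROOFS =====

theorem pvPhrasesB_eq : pvPhrasesB = pvPhrases := by decide

-- a contiguous infix is exactly a drop-then-take at some admissible offset
theorem pv_infix_iff (a b : List String) :
    a <:+: b ↔ ∃ s : Nat, s + a.length ≤ b.length ∧ (b.drop s).take a.length = a := by
  constructor
  · rintro ⟨u, v, rfl⟩
    refine ⟨u.length, by simp, ?_⟩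
    simp
  · rintro ⟨s, hle, heq⟩
    have h3 : (b.drop s).drop a.length = b.drop (s + a.length) := by
      rw [List.drop_drop]
    refine ⟨b.take s, b.drop (s + a.length), ?_⟩
    calc b.take s ++ a ++ b.drop (s + a.length)
        = b.take s ++ ((b.drop s).take a.length ++ (b.drop s).drop a.length) := by
          rw [heq, h3, List.append_assoc]
      _ = b.take s ++ b.drop s := by rw [List.take_append_drop]
      _ = b := List.take_append_drop s b

theorem pv_dropTake_infix (l : List String) (i k : Nat) : (l.drop i).take k <:+: l :=
  ((List.take_prefix k (l.drop i)).isInfix).trans ((List.drop_suffix i l).isInfix)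

-- A's inner scan over start offsets finds exactly the infix relation
theorem pv_anySlice_iff (a b : List String) (_h : a.length ≤ b.length) :
    ((PySem.List.pyRange 0 ((b.length : Int) - (a.length : Int) + 1) 1).any (fun s =>
      PySem.List.slice b (some s) (some (s + (a.length : Int))) == a)) = true ↔ a <:+: b := by
  rw [List.any_eq_true]
  constructor
  · rintro ⟨s, hmem, hbeq⟩
    rw [PySem.List.mem_pyRange_one] at hmem
    obtain ⟨h0, h1⟩ := hmem
    rw [PySem.List.slice_toNat b h0 (by omega), beq_iff_eq] at hbeq
    have hk : (s + (a.length : Int)).toNat - s.toNat = a.length := by omega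
    rw [hk] at hbeq
    exact (pv_infix_iff a b).mpr ⟨s.toNat, by omega, hbeq⟩
  · intro hinf
    obtain ⟨s, hle, heq⟩ := (pv_infix_iff a b).mp hinf
    refine ⟨(s : Int), ?_, ?_⟩
    · rw [PySem.List.mem_pyRange_one]; omega
    · rw [PySem.List.slice_toNat b (by omega) (by omega), beq_iff_eq]
      have hk : ((s : Int) + (a.length : Int)).toNat - ((s : Int)).toNat = a.length := by omega
      rw [hk, Int.toNat_natCast, heq]

-- A's per-phrase check decides "common infix of ngram or ngram infix of common"
theorem pv_acheck_iff (ngram common : List String) :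
    (let clen : Int := common.length
     let nlen : Int := ngram.length
     if nlen ≥ clen then
       (PySem.List.pyRange 0 (nlen - clen + 1) 1).any (fun start =>
         PySem.List.slice ngram (some start) (some (start + clen)) == common)
     else if clen ≥ nlen then
       (PySem.List.pyRange 0 (clen - nlen + 1) 1).any (fun start =>
         PySem.List.slice common (some start) (some (start + nlen)) == ngram)
     else false) = true ↔ (common <:+: ngram ∨ ngram <:+: common) := by
  by_cases h : (ngram.length : Int) ≥ (common.length : Int)
  · simp only [h, if_pos]
    rw [pv_anySlice_iff common ngram (by exact_mod_cast h)]
    constructor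
    · exact Or.inl
    · rintro (h1 | h2)
      · exact h1
      · have hlen : ngram.length = common.length :=
          Nat.le_antisymm h2.length_le (by exact_mod_cast h)
        rw [h2.eq_of_length hlen]
  · have h' : (common.length : Int) ≥ (ngram.length : Int) := by omega
    simp only [h, h', if_pos, if_false]
    rw [pv_anySlice_iff ngram common (by exact_mod_cast h')]
    constructor
    · exact Or.inr
    · rintro (h1 | h2)
      · exfalso; have := h1.length_le; omega
      · exact h2

theorem pv_mem_subB_iff (x : List String) :
    PySem.Set.contains pvSubB x = true ↔ ∃ p ∈ pvPhrases, x <:+: p := by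
  rw [PySem.Set.contains_iff]
  unfold pvSubB
  rw [PySem.Set.mem_ofList, pvPhrasesB_eq, List.mem_flatMap]
  constructor
  · rintro ⟨p, hp, hx⟩
    rw [List.mem_flatMap] at hx
    obtain ⟨i, _, hx⟩ := hx
    rw [List.mem_map] at hx
    obtain ⟨k, _, rfl⟩ := hx
    exact ⟨p, hp, pv_dropTake_infix p i k⟩
  · rintro ⟨p, hp, hinf⟩
    obtain ⟨s, hle, heq⟩ := (pv_infix_iff x p).mp hinf
    refine ⟨p, hp, ?_⟩
    rw [List.mem_flatMap]
    refine ⟨s, by rw [List.mem_range]; omega, ?_⟩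
    rw [List.mem_map]
    exact ⟨x.length, by rw [List.mem_range]; omega, heq⟩

theorem pv_mem_fullB_iff (x : List String) :
    PySem.Set.contains pvFullB x = true ↔ x ∈ pvPhrases := by
  rw [PySem.Set.contains_iff]
  unfold pvFullB
  rw [PySem.Set.mem_ofList, pvPhrasesB_eq]

theorem pv_phrases_ne_nil : ∀ p ∈ pvPhrases, p ≠ [] := by decide

theorem pv_mem_lensB_iff (len : Int) :
    len ∈ pvLensB ↔ ∃ q ∈ pvPhrases, len = (q.length : Int) := by
  unfold pvLensB
  rw [PySem.Set.mem_ofList, pvPhrasesB_eq, List.mem_map]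
  constructor
  · rintro ⟨q, hq, rfl⟩; exact ⟨q, hq, rfl⟩
  · rintro ⟨q, hq, rfl⟩; exact ⟨q, hq, rfl⟩

-- B's offset scan finds exactly the phrases occurring inside the ngram
theorem pv_bscan_iff (ngram : List String) :
    ((PySem.List.pyRange 0 (ngram.length : Int) 1).any (fun i =>
      pvLensB.any (fun len =>
        PySem.Set.contains pvFullB (PySem.List.slice ngram (some i) (some (i + len)))))) = true
      ↔ ∃ p ∈ pvPhrases, p <:+: ngram := by
  simp only [List.any_eq_true]
  constructor
  · rintro ⟨i, hi, len, hlen, hm⟩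
    rw [PySem.List.mem_pyRange_one] at hi
    obtain ⟨q, _, rfl⟩ := (pv_mem_lensB_iff len).mp hlen
    rw [pv_mem_fullB_iff] at hm
    rw [PySem.List.slice_toNat ngram (by omega) (by omega)] at hm
    exact ⟨_, hm, pv_dropTake_infix ngram i.toNat ((i + (q.length : Int)).toNat - i.toNat)⟩
  · rintro ⟨p, hp, hinf⟩
    obtain ⟨s, hle, heq⟩ := (pv_infix_iff p ngram).mp hinf
    have hpnil : p ≠ [] := pv_phrases_ne_nil p hp
    have hplen : 0 < p.length := List.length_pos_iff.mpr hpnil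
    refine ⟨(s : Int), by rw [PySem.List.mem_pyRange_one]; omega,
            (p.length : Int), (pv_mem_lensB_iff _).mpr ⟨p, hp, rfl⟩, ?_⟩
    rw [pv_mem_fullB_iff]
    rw [PySem.List.slice_toNat ngram (by omega) (by omega)]
    have hk : ((s : Int) + (p.length : Int)).toNat - ((s : Int)).toNat = p.length := by omega
    rw [hk, Int.toNat_natCast, heq]
    exact hp

theorem pv_a_iff (ngram : List String) :
    is_common_phrase_py ngram = true ↔
      ∃ p ∈ pvPhrases, (p <:+: ngram ∨ ngram <:+: p) := by
  unfold is_common_phrase_py pvCommonSet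
  rw [List.any_eq_true]
  constructor
  · rintro ⟨c, hc, hchk⟩
    exact ⟨c, (PySem.Set.mem_ofList _ c).mp hc, (pv_acheck_iff ngram c).mp hchk⟩
  · rintro ⟨p, hp, hor⟩
    exact ⟨p, (PySem.Set.mem_ofList _ p).mpr hp, (pv_acheck_iff ngram p).mpr hor⟩

theorem pv_b_iff (ngram : List String) :
    is_common_phrase_py_alt ngram = true ↔
      ∃ p ∈ pvPhrases, (p <:+: ngram ∨ ngram <:+: p) := by
  unfold is_common_phrase_py_alt
  by_cases hsub : PySem.Set.contains pvSubB ngram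
  · simp only [hsub, if_pos, true_iff]
    obtain ⟨p, hp, hinf⟩ := (pv_mem_subB_iff ngram).mp hsub
    exact ⟨p, hp, Or.inr hinf⟩
  · simp only [hsub, Bool.false_eq_true, if_false]
    rw [pv_bscan_iff]
    constructor
    · rintro ⟨p, hp, hinf⟩; exact ⟨p, hp, Or.inl hinf⟩
    · rintro ⟨p, hp, hinf | hinf⟩
      · exact ⟨p, hp, hinf⟩
      · exact absurd ((pv_mem_subB_iff ngram).mpr ⟨p, hp, hinf⟩) (by simpa using hsub)

-- ===== VERDICT (by name: the statement is the Claim_ definition above) =====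
theorem is_common_phrase_py_spec : Claim_equal_is_common_phrase_py := by
  intro ngram _
  unfold Spec_is_common_phrase_py
  have := (pv_a_iff ngram).trans (pv_b_iff ngram).symm
  cases ha : is_common_phrase_py ngram <;> cases hb : is_common_phrase_py_alt ngram <;>
    simp_all
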